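-- pv_equiv track=rewrite | github.com/pola-hany/text-bot1 | fonts/english_fonts.py | to_sans
-- ===== SOURCE A (Python) =====
-- def to_sans(text):
--     sans_map = {'A': '𝖠', 'B': '𝖡', 'C': '𝖢', 'D': '𝖣', 'E': '𝖤', 'F': '𝖥', 'G': '𝖦',
--                 'H': '𝖧', 'I': '𝖨', 'J': '𝖩', 'K': '𝖪', 'L': '𝖫', 'M': '𝖬', 'N': '𝖭',
--                 'O': '𝖮', 'P': '𝖯', 'Q': '𝖰', 'R': '𝖱', 'S': '𝖲', 'T': '𝖳', 'U': '𝖴',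
--                 'V': '𝖵', 'W': '𝖶', 'X': '𝖷', 'Y': '𝖸', 'Z': '𝖹',
--                 'a': '𝖺', 'b': '𝖻', 'c': '𝖼', 'd': '𝖽', 'e': '𝖾', 'f': '𝖿', 'g': '𝗀',
--                 'h': '𝗁', 'i': '𝗂', 'j': '𝗃', 'k': '𝗄', 'l': '𝗅', 'm': '𝗆', 'n': '𝗇',
--                 'o': '𝗈', 'p': '𝗉', 'q': '𝗊', 'r': '𝗋', 's': '𝗌', 't': '𝗍', 'u': '𝗎',
--                 'v': '𝗏', 'w': '𝗐', 'x': '𝗑', 'y': '𝗒', 'z': '𝗓'}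
--     return ''.join([sans_map.get(c, c) for c in text])
-- ===== SOURCE B (Python) =====
-- def _shift_range(text, lo, hi, base):
--     # one pass: shift every char in [lo, hi] into the block starting at `base`
--     return ''.join(chr(ord(c) - ord(lo) + base) if lo <= c <= hi else c for c in text)
--
-- def to_sans(text):
--     # two staged passes: first move A-Z into Mathematical Sans-Serif capitals,
--     # then move a-z into the small letters (the first pass's outputs are > 'z',
--     # so the second pass leaves them untouched)
--     return _shift_range(_shift_range(text, 'A', 'Z', 0x1D5A0), 'a', 'z', 0x1D5BA)
-- ===== Notes on version B (the rewrite author's own statement) =====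
-- stated objective: alternative
-- what changed: Replaces the single 52-entry dict-lookup pass with two staged arithmetic passes: one whole-string pass shifting A-Z into the contiguous sans-serif capital block, then a second pass over that result shifting a-z into the small-letter block.
import Mathlib
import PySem

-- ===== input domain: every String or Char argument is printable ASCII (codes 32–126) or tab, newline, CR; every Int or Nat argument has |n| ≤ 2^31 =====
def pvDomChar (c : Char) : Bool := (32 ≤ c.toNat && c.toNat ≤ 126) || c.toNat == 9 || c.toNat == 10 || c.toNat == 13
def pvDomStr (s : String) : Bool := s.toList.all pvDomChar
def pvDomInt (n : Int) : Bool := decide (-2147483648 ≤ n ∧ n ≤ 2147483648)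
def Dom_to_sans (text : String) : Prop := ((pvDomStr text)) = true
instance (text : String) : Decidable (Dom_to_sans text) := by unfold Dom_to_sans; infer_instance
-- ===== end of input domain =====

-- B replaces A's single 52-entry dict-lookup pass with two staged whole-string passes that
-- shift the two contiguous letter ranges arithmetically (alternative decomposition; no speed claim).

-- ===== PORT A =====
def sansMap : PySem.Dict Char String := PySem.Dict.ofList
  [('A', "𝖠"), ('B', "𝖡"), ('C', "𝖢"), ('D', "𝖣"), ('E', "𝖤"), ('F', "𝖥"), ('G', "𝖦"),
   ('H', "𝖧"), ('I', "𝖨"), ('J', "𝖩"), ('K', "𝖪"), ('L', "𝖫"), ('M', "𝖬"), ('N', "𝖭"),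
   ('O', "𝖮"), ('P', "𝖯"), ('Q', "𝖰"), ('R', "𝖱"), ('S', "𝖲"), ('T', "𝖳"), ('U', "𝖴"),
   ('V', "𝖵"), ('W', "𝖶"), ('X', "𝖷"), ('Y', "𝖸"), ('Z', "𝖹"),
   ('a', "𝖺"), ('b', "𝖻"), ('c', "𝖼"), ('d', "𝖽"), ('e', "𝖾"), ('f', "𝖿"), ('g', "𝗀"),
   ('h', "𝗁"), ('i', "𝗂"), ('j', "𝗃"), ('k', "𝗄"), ('l', "𝗅"), ('m', "𝗆"), ('n', "𝗇"),
   ('o', "𝗈"), ('p', "𝗉"), ('q', "𝗊"), ('r', "𝗋"), ('s', "𝗌"), ('t', "𝗍"), ('u', "𝗎"),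
   ('v', "𝗏"), ('w', "𝗐"), ('x', "𝗑"), ('y', "𝗒"), ('z', "𝗓")]

-- ''.join([sans_map.get(c, c) for c in text])
def to_sans (text : String) : String :=
  PySem.Str.join "" (text.toList.map (fun c => sansMap.getD c (String.ofList [c])))

-- ===== PORT B =====
-- one pass: shift every char in [lo, hi] into the block starting at `base`
def shiftRange (text : String) (lo hi : Char) (base : Nat) : String :=
  String.ofList (text.toList.map
    (fun c => if lo ≤ c ∧ c ≤ hi then Char.ofNat (c.toNat - lo.toNat + base) else c))

-- two staged passes: capitals first, then small letters over the intermediate string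
def to_sans_alt (text : String) : String :=
  shiftRange (shiftRange text 'A' 'Z' 0x1D5A0) 'a' 'z' 0x1D5BA

-- ===== PRECONDITION & SPEC =====
def Spec_to_sans (text : String) (out : String) : Prop := out = to_sans_alt text
instance (text : String) (out : String) : Decidable (Spec_to_sans text out) := by unfold Spec_to_sans; infer_instance

-- ===== CLAIM =====
def Claim_equal_to_sans : Prop := ∀ (text : String), Dom_to_sans text → Spec_to_sans text (to_sans text)

-- ===== LEMMAS AND PROOFS =====

def shiftChar (lo hi : Char) (base : Nat) (c : Char) : Char :=
  if lo ≤ c ∧ c ≤ hi then Char.ofNat (c.toNat - lo.toNat + base) else c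

theorem intercalate_nil_flatten (lss : List (List Char)) :
    List.intercalate ([] : List Char) lss = lss.flatten := by
  induction lss with
  | nil => rfl
  | cons h t ih => cases t <;> simp_all [List.intercalate, List.intersperse]

set_option maxRecDepth 4096 in
theorem key_char (n : Nat) (hn : n < 127) :
    (sansMap.getD (Char.ofNat n) (String.ofList [Char.ofNat n])).toList
      = [shiftChar 'a' 'z' 0x1D5BA (shiftChar 'A' 'Z' 0x1D5A0 (Char.ofNat n))] := by
  revert hn
  have : ∀ n ∈ List.range 127,
      (sansMap.getD (Char.ofNat n) (String.ofList [Char.ofNat n])).toList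
        = [shiftChar 'a' 'z' 0x1D5BA (shiftChar 'A' 'Z' 0x1D5A0 (Char.ofNat n))] := by decide
  intro hn
  exact this n (List.mem_range.mpr hn)

theorem key_char' (c : Char) (hc : pvDomChar c = true) :
    (sansMap.getD c (String.ofList [c])).toList
      = [shiftChar 'a' 'z' 0x1D5BA (shiftChar 'A' 'Z' 0x1D5A0 c)] := by
  have h127 : c.toNat < 127 := by
    simp [pvDomChar] at hc
    omega
  have := key_char c.toNat h127
  rwa [Char.ofNat_toNat] at this

theorem flatten_map_eq (l : List Char) (h : ∀ c ∈ l, pvDomChar c = true) :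
    (l.map (fun c => (sansMap.getD c (String.ofList [c])).toList)).flatten
      = l.map (fun c => shiftChar 'a' 'z' 0x1D5BA (shiftChar 'A' 'Z' 0x1D5A0 c)) := by
  induction l with
  | nil => rfl
  | cons x t ih =>
    simp only [List.map_cons, List.flatten_cons]
    rw [key_char' x (h x List.mem_cons_self),
        ih (fun c hc => h c (List.mem_cons_of_mem _ hc))]
    rfl

theorem alt_eq_map (text : String) :
    to_sans_alt text
      = String.ofList (text.toList.map
          (fun c => shiftChar 'a' 'z' 0x1D5BA (shiftChar 'A' 'Z' 0x1D5A0 c))) := by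
  unfold to_sans_alt shiftRange
  rw [String.toList_ofList, List.map_map]
  rfl

theorem to_sans_spec : Claim_equal_to_sans := by
  intro text hdom
  unfold Spec_to_sans to_sans
  rw [alt_eq_map]
  have hdom' : ∀ c ∈ text.toList, pvDomChar c = true := by
    simpa [Dom_to_sans, pvDomStr, List.all_eq_true] using hdom
  apply congrArg String.ofList
  rw [show ("" : String).toList = [] from rfl]
  rw [show ∀ lss, PySem.Chars.join [] lss = List.intercalate [] lss from fun _ => rfl]
  rw [intercalate_nil_flatten, List.map_map]
  rw [show ((String.toList) ∘ fun c => sansMap.getD c (String.ofList [c]))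
      = fun c => (sansMap.getD c (String.ofList [c])).toList from rfl]
  exact flatten_map_eq text.toList hdom'
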